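-- pv_equiv track=rewrite | github.com/keithwissing/adventofcode | 2020/day16.py | figure_labels
-- ===== SOURCE A (Python) =====
-- def figure_labels(cps):
--     labels = [''] * len(cps)
--     while nl := [i for i, v in enumerate(cps) if len(v) == 1]:
--         n = nl[0]
--         labels[n] = cps[n][0]
--         for p in cps:
--             if labels[n] in p:
--                 p.remove(labels[n])
--     return labels
-- ===== SOURCE B (Python) =====
-- def figure_labels(cps):
--     n = len(cps)
--     # intern every candidate string to a small integer id
--     ids = {}
--     vals = []
--     for row in cps:
--         for v in row:
--             if v not in ids:
--                 ids[v] = len(vals)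
--                 vals.append(v)
--     lens = [len(row) for row in cps]
--     # sum of remaining ids per position: once a position is down to one
--     # candidate, that sum IS the id of its remaining candidate
--     sid = [sum(ids[v] for v in row) for row in cps]
--     # inverted index: id -> {position: multiplicity}
--     occ = {}
--     p = 0
--     for row in cps:
--         for v in row:
--             d = occ.setdefault(ids[v], {})
--             d[p] = d.get(p, 0) + 1
--         p += 1
--     labels = [''] * n
--     live = [q for q in range(n) if lens[q] == 1]
--     while live:
--         j = min(live)
--         k = sid[j]
--         labels[j] = vals[k]
--         for q in list(occ[k]):
--             lens[q] -= 1
--             sid[q] -= k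
--             if occ[k][q] > 1:
--                 occ[k][q] -= 1
--             else:
--                 del occ[k][q]
--             if lens[q] == 1:
--                 live.append(q)
--         live = [q for q in live if lens[q] == 1]
--     return labels
-- ===== Notes on version B (the rewrite author's own statement) =====
-- stated objective: alternative
-- what changed: B replaces A's round-by-round rescan of all candidate lists (enumerate-filter for singletons, then membership test and list.remove on every list) by a preprocessing phase that interns each string to an integer id and builds an inverted index id -> {position: multiplicity} plus per-position lengths and sums of ids, then runs an elimination loop driven by that index: the removal step touches only the positions that actually contain the selected label, a worklist collects positions that just became singletons, and a singleton's remaining label is recovered arithmetically as its id-sum; …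
import Mathlib
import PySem

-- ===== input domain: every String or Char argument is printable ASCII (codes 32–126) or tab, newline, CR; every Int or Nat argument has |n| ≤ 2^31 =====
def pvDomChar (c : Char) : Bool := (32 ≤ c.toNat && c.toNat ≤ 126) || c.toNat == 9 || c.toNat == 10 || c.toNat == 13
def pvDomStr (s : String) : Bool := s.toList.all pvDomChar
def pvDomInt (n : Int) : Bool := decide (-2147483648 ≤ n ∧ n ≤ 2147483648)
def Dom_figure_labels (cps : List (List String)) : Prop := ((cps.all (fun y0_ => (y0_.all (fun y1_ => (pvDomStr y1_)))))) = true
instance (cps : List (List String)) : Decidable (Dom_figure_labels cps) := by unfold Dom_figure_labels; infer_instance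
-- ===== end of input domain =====

-- B avoids A's round-by-round rescans: it interns the candidate strings to integer ids, builds an
-- inverted index id -> (position -> multiplicity) plus per-position lengths and id-sums once, and then
-- eliminates via that index: removals touch only positions containing the selected label, a worklist
-- collects positions that just became singletons, and a singleton's label is its id-sum.
-- NOTE: Python A empties the inner lists of its argument in place; B does not mutate. The equivalence
-- proved here is about the RETURN value only.

-- ===== PORT A =====
-- while loop ported with fuel = (total number of candidate entries) + 1: each iteration empties the
-- selected singleton list, so the total length strictly decreases and the fuel is never exhausted.
def figALoop (fuel : Nat) (cps : List (List String)) (labels : List String) : List String :=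
  match fuel with
  | 0 => labels
  | fuel + 1 =>
    match (((PySem.List.enumerate cps).filter (fun iv => iv.2.length == 1)).map (fun iv => iv.1)) with
    | [] => labels
    | n :: _ =>
      -- n is an enumerate index, hence n ≥ 0 and .toNat is exact; labels[n] = cps[n][0]
      let v := (cps.getD n.toNat []).getD 0 ""
      figALoop fuel
        (cps.map (fun p => if v ∈ p then (PySem.List.remove? p v).getD p else p))
        (labels.set n.toNat v)

def figure_labels (cps : List (List String)) : List String :=
  figALoop ((cps.map List.length).sum + 1) cps (List.replicate cps.length "")

-- ===== PORT B =====
-- interning pass: ids : value -> id, vals : id -> value ('if v not in ids: ids[v] = len(vals); vals.append(v)')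
def figBIntern (cps : List (List String)) : PySem.Dict String Nat × List String :=
  cps.foldl (fun st row => row.foldl (fun st v =>
      if st.1.contains v then st else (st.1.insert v st.2.length, st.2 ++ [v])) st)
    (PySem.Dict.empty, [])

-- inverted-index pass: occ[ids[v]][p] += 1 for every occurrence of v in row p; the running position
-- counter p is a non-negative Python int, ported as Nat (exact here). 'd = occ.setdefault(ids[v], {});
-- d[p] = d.get(p, 0) + 1' mutates the dict held under the key, i.e. it is Dict.modify of that entry.
def figBOcc (ids : PySem.Dict String Nat) (cps : List (List String)) : PySem.Dict Nat (PySem.Dict Nat Nat) :=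
  (cps.foldl (fun st row =>
      (row.foldl (fun occ v =>
          occ.modify (ids.getD v 0) PySem.Dict.empty (fun d => d.modify st.2 0 (· + 1))) st.1,
       st.2 + 1))
    (PySem.Dict.empty, (0 : Nat))).1

-- body of 'for q in list(occ[k])' on the state (occ, lens, sid, live); counts, lengths and id-sums are
-- non-negative Python ints, ported as Nat (the decrements are guarded: q indexes an occurrence of the label)
def figBStep (k : Nat) (st : PySem.Dict Nat (PySem.Dict Nat Nat) × List Nat × List Nat × List Nat)
    (q : Nat) : PySem.Dict Nat (PySem.Dict Nat Nat) × List Nat × List Nat × List Nat :=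
  let lens := st.2.1.set q (st.2.1.getD q 0 - 1)
  let sid := st.2.2.1.set q (st.2.2.1.getD q 0 - k)
  let d := st.1.getD k PySem.Dict.empty
  -- 'if occ[k][q] > 1: occ[k][q] -= 1 else: del occ[k][q]' (k is always a key of occ; getD is exact here)
  let occ := if 1 < d.getD q 0 then st.1.insert k (d.insert q (d.getD q 0 - 1))
             else st.1.insert k (d.erase q)
  let live := if lens.getD q 0 == 1 then st.2.2.2 ++ [q] else st.2.2.2
  (occ, lens, sid, live)

-- 'while live:' ported with the same fuel bound as A's loop (each round empties the selected list)
def figBLoop (fuel : Nat) (vals : List String) (occ : PySem.Dict Nat (PySem.Dict Nat Nat))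
    (lens sid : List Nat) (labels : List String) (live : List Nat) : List String :=
  match fuel with
  | 0 => labels
  | fuel + 1 =>
    match live with
    | [] => labels
    | _ :: _ =>
      let j := (PySem.List.min? live (fun x => x)).getD 0   -- min(live); live nonempty, default unused
      let k := sid.getD j 0
      let st := ((occ.getD k PySem.Dict.empty).keys).foldl (figBStep k) (occ, lens, sid, live)
      figBLoop fuel vals st.1 st.2.1 st.2.2.1 (labels.set j (vals.getD k ""))
        (st.2.2.2.filter (fun q => st.2.1.getD q 0 == 1))

def figure_labels_alt (cps : List (List String)) : List String :=
  let n := cps.length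
  let ids := (figBIntern cps).1
  let vals := (figBIntern cps).2
  let lens := cps.map List.length
  let sid := cps.map (fun row => (row.map (fun v => ids.getD v 0)).sum)
  let occ := figBOcc ids cps
  figBLoop (lens.sum + 1) vals occ lens sid (List.replicate n "")
    ((List.range n).filter (fun q => lens.getD q 0 == 1))

-- ===== PRECONDITION & SPEC =====
def Spec_figure_labels (cps : List (List String)) (out : List String) : Prop := out = figure_labels_alt cps
instance (cps : List (List String)) (out : List String) : Decidable (Spec_figure_labels cps out) := by unfold Spec_figure_labels; infer_instance

-- ===== CLAIM (what is proved, stated in full; the proofs are below) =====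
def Claim_equal_figure_labels : Prop := ∀ (cps : List (List String)), Dom_figure_labels cps → Spec_figure_labels cps (figure_labels cps)

-- ===== LEMMAS AND PROOFS =====

-- basic getD facts
lemma pvGetD_set (l : List Nat) (i k : Nat) (a d : Nat) :
    (l.set i a).getD k d = if k = i ∧ i < l.length then a else l.getD k d := by
  simp only [List.getD_eq_getElem?_getD, List.getElem?_set]
  split_ifs <;> simp_all

lemma pvGetD_big {α : Type} (l : List α) (i : Nat) (d : α) (h : l.length ≤ i) : l.getD i d = d := by
  simp [List.getD_eq_getElem?_getD, List.getElem?_eq_none h]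

lemma pvGetD_map_f {α β : Type} [Inhabited β] (f : List α → β) (l : List (List α)) (i : Nat)
    (dl : List α) (db : β) (hf : f dl = db) : (l.map f).getD i db = f (l.getD i dl) := by
  by_cases h : i < l.length
  · simp [List.getD_eq_getElem?_getD, h]
  · rw [pvGetD_big _ _ _ (by simpa using Nat.le_of_not_lt h),
      pvGetD_big _ _ _ (Nat.le_of_not_lt h), hf]

-- Dict.erase facts (PySem.Dict.erase keeps the other keys: it filters the items list)
lemma pvGet?_erase {κ ν : Type} [BEq κ] [LawfulBEq κ] [DecidableEq κ] (d : PySem.Dict κ ν) (k k' : κ) :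
    (d.erase k).get? k' = if k' = k then none else d.get? k' := by
  obtain ⟨l⟩ := d
  induction l with
  | nil => simp [PySem.Dict.erase, PySem.Dict.get?]
  | cons p t ih =>
    simp only [PySem.Dict.erase, PySem.Dict.get?, List.filter_cons] at *
    by_cases h1 : p.1 = k
    · subst h1
      simp only [BEq.rfl, Bool.not_true] at *
      rw [if_neg (by simp)]
      by_cases h2 : k' = p.1
      · subst h2
        rw [List.find?_cons_of_pos (by simp)]
        simpa using ih
      · rw [List.find?_cons_of_neg (by simpa using fun h => h2 h.symm)]
        simpa using ih
    · rw [if_pos (by simpa using h1)]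
      by_cases h2 : p.1 = k'
      · subst h2
        rw [List.find?_cons_of_pos (by simp), if_neg h1, List.find?_cons_of_pos (by simp)]
      · rw [List.find?_cons_of_neg (by simpa using h2), List.find?_cons_of_neg (by simpa using h2)]
        exact ih

lemma pvGetD_erase {κ ν : Type} [BEq κ] [LawfulBEq κ] [DecidableEq κ] (d : PySem.Dict κ ν)
    (k k' : κ) (d0 : ν) : (d.erase k).getD k' d0 = if k' = k then d0 else d.getD k' d0 := by
  simp only [PySem.Dict.getD, pvGet?_erase]
  split_ifs <;> rfl

lemma pvMem_keys_erase {κ ν : Type} [BEq κ] [LawfulBEq κ] (d : PySem.Dict κ ν) (k k' : κ) :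
    k' ∈ (d.erase k).keys ↔ k' ∈ d.keys ∧ k' ≠ k := by
  obtain ⟨l⟩ := d
  simp only [PySem.Dict.erase, PySem.Dict.keys, List.mem_map, List.mem_filter]
  constructor
  · rintro ⟨p, ⟨hp, hne⟩, rfl⟩
    exact ⟨⟨p, hp, rfl⟩, by simpa using hne⟩
  · rintro ⟨⟨p, hp, rfl⟩, hne⟩
    exact ⟨p, ⟨hp, by simpa using hne⟩, rfl⟩

lemma pvNodup_keys_erase {κ ν : Type} [BEq κ] (d : PySem.Dict κ ν) (k : κ)
    (h : d.keys.Nodup) : (d.erase k).keys.Nodup := by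
  obtain ⟨l⟩ := d
  simp only [PySem.Dict.erase, PySem.Dict.keys] at *
  exact (List.Sublist.map (fun p => p.1) (List.filter_sublist (l := l))).nodup h

-- A's comprehension [i for i, v in enumerate(cps) if len(v) == 1] as a filtered index range
lemma pvEnumChar (xs : List (List String)) (s : Nat) :
    (((PySem.List.enumerate xs (s : Int)).filter (fun iv => iv.2.length == 1)).map (fun iv => iv.1))
    = ((List.range xs.length).filter (fun i => (xs.getD i []).length == 1)).map
        (fun i => ((s + i : Nat) : Int)) := by
  induction xs generalizing s with
  | nil => simp [PySem.List.enumerate_nil]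
  | cons x t ih =>
    rw [PySem.List.enumerate_cons, List.length_cons, List.range_succ_eq_map]
    have hcast : ((s : Int) + 1) = ((s + 1 : Nat) : Int) := by push_cast; ring
    rw [hcast]
    by_cases h : x.length = 1 <;>
      simp only [List.filter_cons, List.map_cons, h, beq_self_eq_true, if_pos, ih,
        List.filter_map, List.map_map, List.getD_cons_zero, beq_iff_eq, if_false] <;>
      [skip; skip] <;>
      simp only [Function.comp_def, Nat.succ_eq_add_one, List.getD_cons_succ] <;>
      first
      | (refine List.map_congr_left (fun i _ => by push_cast; ring))
      | (refine congrArg₂ _ (by simp) (List.map_congr_left (fun i _ => by push_cast; ring)))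

-- lookup of an interned value is its index in vals
lemma pvIdxOf_getD (l : List String) (x : String) (h : x ∈ l) : l.getD (l.idxOf x) "" = x := by
  rw [List.getD_eq_getElem?_getD, List.getElem?_eq_getElem (List.idxOf_lt_length_iff.mpr h)]
  simp [List.getElem_idxOf]

lemma pvGetD_ne_of_ne (l : List String) (h : l.Nodup) (k k' : Nat) (hk : k < l.length)
    (hk' : k' < l.length) (hne : k ≠ k') : l.getD k "" ≠ l.getD k' "" := by
  rw [List.getD_eq_getElem?_getD, List.getD_eq_getElem?_getD, List.getElem?_eq_getElem hk,
    List.getElem?_eq_getElem hk']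
  simpa [List.Nodup.getElem_inj_iff h] using hne

lemma pvSum_map_erase (L : List String) (f : String → Nat) (x : String) (h : x ∈ L) :
    ((L.erase x).map f).sum = (L.map f).sum - f x := by
  have h2 : (L.map f).sum = f x + ((L.erase x).map f).sum := by
    rw [List.Perm.sum_eq (List.Perm.map f (List.perm_cons_erase h))]; simp
  omega

-- proof-side names for the fold bodies of B's passes (definitionally equal to the ports' lambdas)
def pvIStep (st : PySem.Dict String Nat × List String) (v : String) :
    PySem.Dict String Nat × List String :=
  if st.1.contains v then st else (st.1.insert v st.2.length, st.2 ++ [v])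

def pvOStep (idOf : String → Nat) (p : Nat) (occ : PySem.Dict Nat (PySem.Dict Nat Nat))
    (v : String) : PySem.Dict Nat (PySem.Dict Nat Nat) :=
  occ.modify (idOf v) PySem.Dict.empty (fun d => d.modify p 0 (· + 1))

def pvOFold (idOf : String → Nat) (cps : List (List String))
    (st : PySem.Dict Nat (PySem.Dict Nat Nat) × Nat) : PySem.Dict Nat (PySem.Dict Nat Nat) × Nat :=
  cps.foldl (fun st row => (row.foldl (pvOStep idOf st.2) st.1, st.2 + 1)) st

-- ----- the interning pass -----
def pvInternP (st : PySem.Dict String Nat × List String) : Prop :=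
  st.2.Nodup ∧ (∀ v, st.1.contains v = true ↔ v ∈ st.2) ∧
  (∀ v ∈ st.2, st.1.getD v 0 = st.2.idxOf v)

lemma pvInternAux (L : List String) (st : PySem.Dict String Nat × List String) (h : pvInternP st) :
    pvInternP (L.foldl pvIStep st) ∧ st.2 <+: (L.foldl pvIStep st).2 ∧
    (∀ v ∈ L, v ∈ (L.foldl pvIStep st).2) := by
  induction L generalizing st with
  | nil => exact ⟨h, List.prefix_refl _, by simp⟩
  | cons v t ih =>
    obtain ⟨hnd, hcon, hidx⟩ := h
    rw [List.foldl_cons]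
    by_cases hv : st.1.contains v = true
    · have hstep : pvIStep st v = st := by simp [pvIStep, hv]
      rw [hstep]
      obtain ⟨hP, hpre, hmem⟩ := ih st ⟨hnd, hcon, hidx⟩
      refine ⟨hP, hpre, fun w hw => ?_⟩
      rcases List.mem_cons.mp hw with rfl | hw
      · exact hpre.subset ((hcon w).mp hv)
      · exact hmem w hw
    · have hvm : v ∉ st.2 := fun hm => hv ((hcon v).mpr hm)
      have hstep : pvIStep st v = (st.1.insert v st.2.length, st.2 ++ [v]) := by
        simp [pvIStep, hv]
      rw [hstep]
      have hP' : pvInternP (st.1.insert v st.2.length, st.2 ++ [v]) := by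
        refine ⟨by rw [List.nodup_append]; exact ⟨hnd, List.nodup_singleton v, by intro a ha b hb; rw [List.mem_singleton] at hb; subst hb; exact fun h => hvm (h ▸ ha)⟩, fun w => ?_, fun w hw => ?_⟩
        · rw [PySem.Dict.contains_insert]
          simp only [List.mem_append, List.mem_singleton, Bool.or_eq_true, beq_iff_eq]
          rw [hcon w]; tauto
        · rcases List.mem_append.mp hw with hw | hw
          · have hne : w ≠ v := fun h => hvm (h ▸ hw)
            rw [PySem.Dict.getD_insert, if_neg hne, hidx w hw, List.idxOf_append,
              if_pos hw]
          · rw [List.mem_singleton] at hw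
            subst hw
            rw [PySem.Dict.getD_insert, if_pos rfl, List.idxOf_append, if_neg hvm]
            simp [List.idxOf]
      obtain ⟨hP, hpre, hmem⟩ := ih _ hP'
      refine ⟨hP, List.IsPrefix.trans ⟨[v], rfl⟩ hpre, fun w hw => ?_⟩
      rcases List.mem_cons.mp hw with rfl | hw
      · exact hpre.subset (by simp)
      · exact hmem w hw

lemma pvInternSpec (cps : List (List String)) :
    pvInternP (figBIntern cps) ∧ (∀ row ∈ cps, ∀ v ∈ row, v ∈ (figBIntern cps).2) := by
  have hI : figBIntern cps = cps.flatten.foldl pvIStep (PySem.Dict.empty, []) := by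
    rw [figBIntern, List.foldl_flatten]
    rfl
  have h0 : pvInternP (PySem.Dict.empty, ([] : List String)) := by
    refine ⟨List.nodup_nil, fun v => ?_, by simp⟩
    simp [pysem]
  obtain ⟨hP, _, hmem⟩ := pvInternAux cps.flatten (PySem.Dict.empty, []) h0
  rw [hI]
  exact ⟨hP, fun row hr v hv => hmem v (List.mem_flatten.mpr ⟨row, hr, hv⟩)⟩

-- ----- the inverted-index pass -----
def pvOccP (occ : PySem.Dict Nat (PySem.Dict Nat Nat)) : Prop :=
  (∀ k, (occ.getD k PySem.Dict.empty).keys.Nodup) ∧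
  (∀ k q, q ∈ (occ.getD k PySem.Dict.empty).keys ↔ 0 < (occ.getD k PySem.Dict.empty).getD q 0)

lemma pvOccRow (idOf : String → Nat) (row : List String) (p : Nat)
    (occ : PySem.Dict Nat (PySem.Dict Nat Nat)) (h : pvOccP occ) :
    pvOccP (row.foldl (pvOStep idOf p) occ) ∧
    (∀ k q, ((row.foldl (pvOStep idOf p) occ).getD k PySem.Dict.empty).getD q 0
      = (occ.getD k PySem.Dict.empty).getD q 0 +
        (if q = p then (row.filter (fun v => idOf v == k)).length else 0)) := by
  induction row generalizing occ with
  | nil => exact ⟨h, by simp⟩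
  | cons v t ih =>
    obtain ⟨hnd, hiff⟩ := h
    rw [List.foldl_cons]
    have hmod : ∀ k, (pvOStep idOf p occ v).getD k PySem.Dict.empty
        = if k = idOf v then (occ.getD (idOf v) PySem.Dict.empty).modify p 0 (· + 1)
          else occ.getD k PySem.Dict.empty := by
      intro k; rw [pvOStep, PySem.Dict.getD_modify]
    have h1 : pvOccP (pvOStep idOf p occ v) := by
      constructor
      · intro k; rw [hmod]
        split_ifs with hk
        · rw [PySem.Dict.keys_modify]
          exact PySem.Dict.nodup_keys_insert _ _ _ (hnd (idOf v))
        · exact hnd k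
      · intro k q; rw [hmod]
        split_ifs with hk
        · rw [PySem.Dict.keys_modify, PySem.Dict.mem_keys_insert, PySem.Dict.getD_modify]
          by_cases hq : q = p
          · subst hq; simp
          · simp only [hq, if_false, false_or]
            exact hiff (idOf v) q
        · exact hiff k q
    have hcnt : ∀ k q, ((pvOStep idOf p occ v).getD k PySem.Dict.empty).getD q 0
        = (occ.getD k PySem.Dict.empty).getD q 0 + (if k = idOf v ∧ q = p then 1 else 0) := by
      intro k q; rw [hmod]
      by_cases hk : k = idOf v
      · rw [if_pos hk]; subst hk
        rw [PySem.Dict.getD_modify]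
        by_cases hq : q = p
        · subst hq; rw [if_pos rfl, if_pos ⟨rfl, rfl⟩]
        · rw [if_neg hq, if_neg (fun h' => hq h'.2), Nat.add_zero]
      · rw [if_neg hk, if_neg (fun h' => hk h'.1), Nat.add_zero]
    obtain ⟨hP, hsum⟩ := ih _ h1
    refine ⟨hP, fun k q => ?_⟩
    rw [hsum k q, hcnt k q, List.filter_cons]
    split_ifs <;> simp_all <;> omega

lemma pvOccAll (idOf : String → Nat) (cps : List (List String)) (p0 : Nat)
    (occ : PySem.Dict Nat (PySem.Dict Nat Nat)) (h : pvOccP occ) :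
    pvOccP (pvOFold idOf cps (occ, p0)).1 ∧
    (∀ k q, ((pvOFold idOf cps (occ, p0)).1.getD k PySem.Dict.empty).getD q 0
      = (occ.getD k PySem.Dict.empty).getD q 0 +
        (if p0 ≤ q ∧ q < p0 + cps.length then
          ((cps.getD (q - p0) []).filter (fun v => idOf v == k)).length else 0)) := by
  induction cps generalizing p0 occ with
  | nil =>
    refine ⟨h, fun k q => ?_⟩
    simp [pvOFold]
  | cons row rest ih =>
    obtain ⟨h1, hrow⟩ := pvOccRow idOf row p0 occ h
    have hfold : (pvOFold idOf (row :: rest) (occ, p0))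
        = pvOFold idOf rest (row.foldl (pvOStep idOf p0) occ, p0 + 1) := by
      rw [pvOFold, List.foldl_cons]; rfl
    obtain ⟨hP, hall⟩ := ih (p0 + 1) _ h1
    rw [hfold]
    refine ⟨hP, fun k q => ?_⟩
    rw [hall k q, hrow k q]
    by_cases hq : q = p0
    · subst hq
      rw [if_pos rfl, if_neg (by omega),
        if_pos ⟨le_refl _, by rw [List.length_cons]; omega⟩, Nat.sub_self, List.getD_cons_zero]
      omega
    · rw [if_neg hq]
      by_cases hr : p0 + 1 ≤ q ∧ q < p0 + 1 + rest.length
      · rw [if_pos hr, if_pos ⟨by omega, by rw [List.length_cons]; omega⟩]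
        have hidx : q - p0 = (q - (p0 + 1)) + 1 := by omega
        rw [hidx, List.getD_cons_succ]
        omega
      · rw [if_neg hr, if_neg (by
          rintro ⟨ha, hb⟩
          rw [List.length_cons] at hb
          exact hr ⟨by omega, by omega⟩)]

-- ----- the elimination loop: pointwise description of the fold over occ[k]'s key snapshot -----
lemma pvFoldSpec (k : Nat) (l : List Nat) (occ : PySem.Dict Nat (PySem.Dict Nat Nat))
    (lens sid live : List Nat) (hnd : l.Nodup) (hok : (occ.getD k PySem.Dict.empty).keys.Nodup)
    (hb : ∀ q ∈ l, q < lens.length ∧ q < sid.length) :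
    ((l.foldl (figBStep k) (occ, lens, sid, live)).2.1.length = lens.length) ∧
    ((l.foldl (figBStep k) (occ, lens, sid, live)).2.2.1.length = sid.length) ∧
    (∀ q, (l.foldl (figBStep k) (occ, lens, sid, live)).2.1.getD q 0 =
      if q ∈ l then lens.getD q 0 - 1 else lens.getD q 0) ∧
    (∀ q, (l.foldl (figBStep k) (occ, lens, sid, live)).2.2.1.getD q 0 =
      if q ∈ l then sid.getD q 0 - k else sid.getD q 0) ∧
    (∀ k', k' ≠ k → (l.foldl (figBStep k) (occ, lens, sid, live)).1.getD k' PySem.Dict.empty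
      = occ.getD k' PySem.Dict.empty) ∧
    (∀ q, ((l.foldl (figBStep k) (occ, lens, sid, live)).1.getD k PySem.Dict.empty).getD q 0 =
      if q ∈ l then (occ.getD k PySem.Dict.empty).getD q 0 - 1
      else (occ.getD k PySem.Dict.empty).getD q 0) ∧
    (((l.foldl (figBStep k) (occ, lens, sid, live)).1.getD k PySem.Dict.empty).keys.Nodup) ∧
    (∀ q, q ∈ ((l.foldl (figBStep k) (occ, lens, sid, live)).1.getD k PySem.Dict.empty).keys ↔
      (if q ∈ l then 1 < (occ.getD k PySem.Dict.empty).getD q 0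
       else q ∈ (occ.getD k PySem.Dict.empty).keys)) ∧
    ((l.foldl (figBStep k) (occ, lens, sid, live)).2.2.2 =
      live ++ l.filter (fun q => lens.getD q 0 - 1 == 1)) := by
  induction l generalizing occ lens sid live with
  | nil =>
    refine ⟨rfl, rfl, ?_, ?_, ?_, ?_, hok, ?_, ?_⟩ <;> simp
  | cons i t ih =>
    obtain ⟨hit, hndt⟩ := List.nodup_cons.mp hnd
    obtain ⟨hbl, hbs⟩ := hb i (List.mem_cons_self ..)
    rw [List.foldl_cons]
    have hstep : figBStep k (occ, lens, sid, live) i =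
        ((if 1 < (occ.getD k PySem.Dict.empty).getD i 0 then
            occ.insert k ((occ.getD k PySem.Dict.empty).insert i
              ((occ.getD k PySem.Dict.empty).getD i 0 - 1))
          else occ.insert k ((occ.getD k PySem.Dict.empty).erase i)),
         lens.set i (lens.getD i 0 - 1), sid.set i (sid.getD i 0 - k),
         (if lens.getD i 0 - 1 == 1 then live ++ [i] else live)) := by
      simp only [figBStep]
      rw [pvGetD_set, if_pos (show i = i ∧ i < lens.length from ⟨rfl, hbl⟩)]
    rw [hstep]
    set d := occ.getD k PySem.Dict.empty with hd
    set c := d.getD i 0 with hc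
    set occ1 := (if 1 < c then occ.insert k (d.insert i (c - 1)) else occ.insert k (d.erase i))
      with hocc1
    have hocc1k : occ1.getD k PySem.Dict.empty = if 1 < c then d.insert i (c - 1) else d.erase i := by
      rw [hocc1]; split_ifs <;> rw [PySem.Dict.getD_insert, if_pos rfl]
    have hocc1k' : ∀ k', k' ≠ k → occ1.getD k' PySem.Dict.empty = occ.getD k' PySem.Dict.empty := by
      intro k' hk'
      rw [hocc1]; split_ifs <;> rw [PySem.Dict.getD_insert, if_neg hk']
    have hinner : ∀ q, (occ1.getD k PySem.Dict.empty).getD q 0 = if q = i then c - 1 else d.getD q 0 := by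
      intro q
      rw [hocc1k]
      by_cases h1 : 1 < c
      · rw [if_pos h1, PySem.Dict.getD_insert]
      · rw [if_neg h1, pvGetD_erase]
        by_cases hq : q = i
        · rw [if_pos hq, if_pos hq]; omega
        · rw [if_neg hq, if_neg hq]
    have hok1 : (occ1.getD k PySem.Dict.empty).keys.Nodup := by
      rw [hocc1k]; split_ifs
      · exact PySem.Dict.nodup_keys_insert _ _ _ hok
      · exact pvNodup_keys_erase _ _ hok
    have hm1 : ∀ q, q ∈ (occ1.getD k PySem.Dict.empty).keys ↔
        (if q = i then 1 < c else q ∈ d.keys) := by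
      intro q
      rw [hocc1k]
      by_cases h1 : 1 < c
      · rw [if_pos h1, PySem.Dict.mem_keys_insert]
        by_cases hq : q = i
        · subst hq; rw [if_pos rfl]; simp [h1]
        · rw [if_neg hq]; simp [hq]
      · rw [if_neg h1, pvMem_keys_erase]
        by_cases hq : q = i
        · subst hq; rw [if_pos rfl]; simp [h1]
        · rw [if_neg hq]; simp [hq]
    have hb' : ∀ q ∈ t, q < (lens.set i (lens.getD i 0 - 1)).length ∧
        q < (sid.set i (sid.getD i 0 - k)).length := by
      intro q hq
      rw [List.length_set, List.length_set]
      exact hb q (List.mem_cons_of_mem _ hq)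
    obtain ⟨L1, L2, H1, H2, H3, H4, H5, H6, H7⟩ := ih occ1
      (lens.set i (lens.getD i 0 - 1)) (sid.set i (sid.getD i 0 - k))
      (if lens.getD i 0 - 1 == 1 then live ++ [i] else live) hndt hok1 hb'
    refine ⟨by rw [L1, List.length_set], by rw [L2, List.length_set], ?_, ?_, ?_, ?_, H5, ?_, ?_⟩
    · intro q
      rw [H1 q, pvGetD_set]
      by_cases hq : q = i
      · subst hq
        simp [hit, hbl]
      · simp [List.mem_cons, hq]
    · intro q
      rw [H2 q, pvGetD_set]
      by_cases hq : q = i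
      · subst hq
        simp [hit, hbs]
      · simp [List.mem_cons, hq]
    · intro k' hk'
      rw [H3 k' hk', hocc1k' k' hk']
    · intro q
      rw [H4 q, hinner q]
      by_cases hq : q = i
      · subst hq
        simp [hit, ← hd, ← hc]
      · simp [List.mem_cons, hq, ← hd]
    · intro q
      rw [H6 q]
      by_cases hq : q = i
      · subst hq
        rw [if_neg (fun h => hit h), hm1, if_pos rfl, if_pos (List.mem_cons_self ..)]
      · by_cases hqt : q ∈ t
        · rw [if_pos hqt, if_pos (List.mem_cons_of_mem _ hqt), hinner q, if_neg hq]
        · rw [if_neg hqt, hm1, if_neg hq,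
            if_neg (by simp [List.mem_cons, hq, hqt])]
    · rw [H7, List.filter_cons]
      have hfc : t.filter (fun q => (lens.set i (lens.getD i 0 - 1)).getD q 0 - 1 == 1)
          = t.filter (fun q => lens.getD q 0 - 1 == 1) := by
        refine List.filter_congr (fun q hq => ?_)
        rw [pvGetD_set,
          if_neg (show ¬(q = i ∧ i < lens.length) from fun h => hit (h.1 ▸ hq))]
      rw [hfc]
      split_ifs <;> simp

-- the invariant tying A's state (cps) to B's state (occ, lens, sid, live); vals is fixed
def pvInv (cps : List (List String)) (vals : List String) (occ : PySem.Dict Nat (PySem.Dict Nat Nat))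
    (lens sid live : List Nat) : Prop :=
  lens.length = cps.length ∧ sid.length = cps.length ∧
  (∀ q, lens.getD q 0 = (cps.getD q []).length) ∧
  (∀ q, sid.getD q 0 = ((cps.getD q []).map (fun v => vals.idxOf v)).sum) ∧
  (∀ q, ∀ v ∈ cps.getD q [], v ∈ vals) ∧
  (∀ k, (occ.getD k PySem.Dict.empty).keys.Nodup) ∧
  (∀ k, k < vals.length → ∀ q,
    (occ.getD k PySem.Dict.empty).getD q 0 = (cps.getD q []).count (vals.getD k "")) ∧
  (∀ k, k < vals.length → ∀ q,
    (q ∈ (occ.getD k PySem.Dict.empty).keys ↔ 0 < (cps.getD q []).count (vals.getD k ""))) ∧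
  (∀ q, q ∈ live ↔ (cps.getD q []).length = 1)

-- the main lockstep simulation
lemma pvLoopEq (fuel : Nat) : ∀ (cps : List (List String)) (vals : List String)
    (occ : PySem.Dict Nat (PySem.Dict Nat Nat)) (lens sid live : List Nat)
    (labels : List String), vals.Nodup → pvInv cps vals occ lens sid live →
    figALoop fuel cps labels = figBLoop fuel vals occ lens sid labels live := by
  induction fuel with
  | zero => intro cps vals occ lens sid live labels _ _; rfl
  | succ fuel ih =>
    intro cps vals occ lens sid live labels hvnd hinv
    obtain ⟨hl, hs, hlen, hsid, hcov, hnd, hcnt, hmem, hlive⟩ := hinv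
    have henum := pvEnumChar cps 0
    simp only [Nat.cast_zero, Nat.zero_add] at henum
    rw [figALoop, henum]
    set F := (List.range cps.length).filter (fun i => (cps.getD i []).length == 1) with hFdef
    have hmemF : ∀ q, q ∈ live ↔ q ∈ F := by
      intro q
      rw [hlive, hFdef, List.mem_filter, List.mem_range]
      constructor
      · intro h1
        refine ⟨?_, by simpa using h1⟩
        by_contra hq
        rw [pvGetD_big cps q [] (Nat.le_of_not_lt hq)] at h1
        simp at h1
      · rintro ⟨_, h2⟩
        simpa using h2
    cases hF : F with
    | nil =>
      have hlv : live = [] := by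
        rw [List.eq_nil_iff_forall_not_mem]
        intro q hq
        have := (hmemF q).mp hq
        rw [hF] at this
        exact (List.not_mem_nil).elim this
      rw [hlv]
      simp only [List.map_nil]
      rw [figBLoop]
    | cons m rest =>
      simp only [List.map_cons]
      have hmF : m ∈ F := by rw [hF]; exact List.mem_cons_self ..
      have hmlt : m < cps.length := by
        have := List.mem_filter.mp (hFdef ▸ hmF); exact List.mem_range.mp this.1
      have hsing : (cps.getD m []).length = 1 := by
        have := List.mem_filter.mp (hFdef ▸ hmF); simpa using this.2
      have hmmin : ∀ y ∈ F, m ≤ y := by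
        have hpw : F.Pairwise (· < ·) := List.Pairwise.filter _ (List.pairwise_lt_range)
        rw [hF] at hpw
        intro y hy
        rw [hF] at hy
        rcases List.mem_cons.mp hy with rfl | h
        · exact le_refl _
        · exact le_of_lt ((List.pairwise_cons.mp hpw).1 y h)
      have hlvne : live ≠ [] := by
        intro h
        have := (hmemF m).mpr hmF
        rw [h] at this
        exact (List.not_mem_nil).elim this
      obtain ⟨q0, qs, hq0⟩ := List.exists_cons_of_ne_nil hlvne
      rw [hq0, figBLoop]
      obtain ⟨j0, hj0⟩ : ∃ j0, PySem.List.min? (q0 :: qs) (fun x => x) = some j0 := by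
        cases h : PySem.List.min? (q0 :: qs) (fun x => x) with
        | none => exact absurd ((PySem.List.min?_eq_none_iff _ _).mp h) (by simp)
        | some j0 => exact ⟨j0, rfl⟩
      have hj0m : j0 = m := by
        have h1 : j0 ∈ live := hq0 ▸ PySem.List.min?_mem hj0
        have h2 : m ≤ j0 := hmmin j0 ((hmemF j0).mp h1)
        have h3 : j0 ≤ m := PySem.List.min?_isMin hj0 m (hq0 ▸ (hmemF m).mpr hmF)
        omega
      have hjval : ((PySem.List.min? (q0 :: qs) fun x => x).getD 0) = m := by
        rw [hj0]; simpa using hj0m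
      obtain ⟨x, hx⟩ := List.length_eq_one_iff.mp hsing
      have hxv : x ∈ vals := hcov m x (by rw [hx]; exact List.mem_cons_self ..)
      have hklt : vals.idxOf x < vals.length := List.idxOf_lt_length_iff.mpr hxv
      have hk : sid.getD m 0 = vals.idxOf x := by
        rw [hsid m, hx]; simp
      have hvx : vals.getD (vals.idxOf x) "" = x := pvIdxOf_getD vals x hxv
      have hva : (cps.getD m []).getD 0 "" = x := by rw [hx]; rfl
      have hmn : (((m : Nat) : Int)).toNat = m := Int.toNat_natCast m
      rw [hjval, hk, hmn, hva, hvx]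
      show figALoop fuel _ _ = figBLoop fuel _ _ _ _ _ _
      set kk := vals.idxOf x with hkk
      set K := (occ.getD kk PySem.Dict.empty).keys with hK
      have hcnt' : ∀ q, (occ.getD kk PySem.Dict.empty).getD q 0 = (cps.getD q []).count x := by
        intro q
        rw [hcnt kk hklt q, hvx]
      have hKiff : ∀ q, q ∈ K ↔ x ∈ cps.getD q [] := by
        intro q
        rw [hK, hmem kk hklt q, hvx, List.count_pos_iff]
      have hqlt : ∀ q, x ∈ cps.getD q [] → q < cps.length := by
        intro q hxq
        by_contra hq
        rw [pvGetD_big cps q [] (Nat.le_of_not_lt hq)] at hxq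
        exact (List.not_mem_nil).elim hxq
      have hbK : ∀ q ∈ K, q < lens.length ∧ q < sid.length := by
        intro q hq
        have := hqlt q ((hKiff q).mp hq)
        omega
      obtain ⟨L1, L2, H1, H2, H3, H4, H5, H6, H7⟩ :=
        pvFoldSpec kk K occ lens sid (q0 :: qs) (hnd kk) (hnd kk) hbK
      have hcps' : ∀ q,
          (cps.map (fun p => if x ∈ p then (PySem.List.remove? p x).getD p else p)).getD q []
          = if x ∈ cps.getD q [] then (cps.getD q []).erase x else cps.getD q [] := by
        intro q
        rw [pvGetD_map_f (fun p => if x ∈ p then (PySem.List.remove? p x).getD p else p)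
          cps q [] [] (by simp)]
        by_cases hxq : x ∈ cps.getD q []
        · rw [if_pos hxq, if_pos hxq, PySem.List.remove?_eq_some_erase _ x hxq, Option.getD_some]
        · rw [if_neg hxq, if_neg hxq]
      refine ih (cps.map (fun p => if x ∈ p then (PySem.List.remove? p x).getD p else p)) vals
        _ _ _ _ _ hvnd ⟨?_, ?_, ?_, ?_, ?_, ?_, ?_, ?_, ?_⟩
      · rw [L1, hl, List.length_map]
      · rw [L2, hs, List.length_map]
      · intro q
        rw [H1 q, hcps' q]
        by_cases hq : q ∈ K
        · rw [if_pos hq, if_pos ((hKiff q).mp hq),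
            List.length_erase_of_mem ((hKiff q).mp hq), hlen q]
        · rw [if_neg hq, if_neg (fun h => hq ((hKiff q).mpr h)), hlen q]
      · intro q
        rw [H2 q, hcps' q]
        by_cases hq : q ∈ K
        · rw [if_pos hq, if_pos ((hKiff q).mp hq), hsid q,
            pvSum_map_erase _ _ x ((hKiff q).mp hq)]
        · rw [if_neg hq, if_neg (fun h => hq ((hKiff q).mpr h)), hsid q]
      · intro q v hv
        rw [hcps' q] at hv
        refine hcov q v ?_
        by_cases hxq : x ∈ cps.getD q []
        · rw [if_pos hxq] at hv
          exact (cps.getD q []).erase_sublist.mem hv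
        · rwa [if_neg hxq] at hv
      · intro k'
        by_cases hk' : k' = kk
        · subst hk'
          exact H5
        · rw [H3 k' hk']
          exact hnd k'
      · intro k' hk'lt q
        rw [hcps' q]
        by_cases hk' : k' = kk
        · subst hk'
          rw [H4 q, hvx]
          by_cases hq : q ∈ K
          · rw [if_pos hq, if_pos ((hKiff q).mp hq), List.count_erase_self, hcnt' q]
          · rw [if_neg hq, if_neg (fun h => hq ((hKiff q).mpr h)), hcnt' q]
        · have hne : vals.getD k' "" ≠ x := by
            rw [← hvx]
            exact pvGetD_ne_of_ne vals hvnd k' kk hk'lt hklt hk'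
          rw [H3 k' hk', hcnt k' hk'lt q]
          by_cases hxq : x ∈ cps.getD q []
          · rw [if_pos hxq, List.count_erase_of_ne hne]
          · rw [if_neg hxq]
      · intro k' hk'lt q
        rw [hcps' q]
        by_cases hk' : k' = kk
        · subst hk'
          rw [H6 q, hvx]
          by_cases hq : q ∈ K
          · rw [if_pos hq, if_pos ((hKiff q).mp hq), List.count_erase_self, ← hcnt' q]
            have : 0 < (occ.getD kk PySem.Dict.empty).getD q 0 := by
              rw [hcnt' q]
              exact List.count_pos_iff.mpr ((hKiff q).mp hq)
            constructor <;> intro h <;> omega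
          · rw [if_neg hq, if_neg (fun h => hq ((hKiff q).mpr h)), ← hK]
            rw [hK, hmem kk hklt q, hvx]
        · rw [H3 k' hk', hmem k' hk'lt q]
          have hne : vals.getD k' "" ≠ x := by
            rw [← hvx]
            exact pvGetD_ne_of_ne vals hvnd k' kk hk'lt hklt hk'
          by_cases hxq : x ∈ cps.getD q []
          · rw [if_pos hxq, List.count_erase_of_ne hne]
          · rw [if_neg hxq]
      · intro q
        rw [List.mem_filter, H7, hcps' q, List.mem_append, List.mem_filter]
        have hstq : (List.foldl (figBStep kk) (occ, lens, sid, q0 :: qs) K).2.1.getD q 0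
            = if q ∈ K then lens.getD q 0 - 1 else lens.getD q 0 := H1 q
        constructor
        · rintro ⟨hin, hlq⟩
          rw [hstq] at hlq
          by_cases hq : q ∈ K
          · rw [if_pos hq] at hlq
            rw [if_pos ((hKiff q).mp hq), List.length_erase_of_mem ((hKiff q).mp hq), ← hlen q]
            simpa using hlq
          · rw [if_neg hq] at hlq
            rw [if_neg (fun h => hq ((hKiff q).mpr h)), ← hlen q]
            simpa using hlq
        · intro hlq
          by_cases hq : q ∈ K
          · rw [if_pos ((hKiff q).mp hq), List.length_erase_of_mem ((hKiff q).mp hq),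
              ← hlen q] at hlq
            refine ⟨Or.inr ⟨hq, by simpa using hlq⟩, ?_⟩
            rw [hstq, if_pos hq]
            simpa using hlq
          · rw [if_neg (fun h => hq ((hKiff q).mpr h))] at hlq
            refine ⟨Or.inl (hq0 ▸ (hlive q).mpr hlq), ?_⟩
            rw [hstq, if_neg hq, hlen q]
            simpa using hlq


-- ===== VERDICT (by name: the statement is the Claim_ definition above) =====
set_option maxHeartbeats 1000000 in
theorem figure_labels_spec : Claim_equal_figure_labels := by
  intro cps _
  unfold Spec_figure_labels figure_labels figure_labels_alt
  obtain ⟨⟨hvnd, hcon, hidx⟩, hcovall⟩ := pvInternSpec cps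
  set ids := (figBIntern cps).1 with hids
  set vals := (figBIntern cps).2 with hvals
  have hcovv : ∀ q, ∀ v ∈ cps.getD q [], v ∈ vals := by
    intro q v hv
    by_cases hq : q < cps.length
    · have hrow : cps.getD q [] ∈ cps := by
        rw [List.getD_eq_getElem?_getD, List.getElem?_eq_getElem hq]
        exact List.getElem_mem hq
      exact hcovall _ hrow v hv
    · rw [pvGetD_big cps q [] (Nat.le_of_not_lt hq)] at hv
      exact absurd hv (List.not_mem_nil)
  have hP0 : pvOccP PySem.Dict.empty := by
    constructor
    · intro k
      simp [pysem]
    · intro k q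
      simp [pysem]
  obtain ⟨⟨hnd0, hiff0⟩, hcnt0⟩ :=
    pvOccAll (fun v => ids.getD v 0) cps 0 PySem.Dict.empty hP0
  have hOcc : figBOcc ids cps = (pvOFold (fun v => ids.getD v 0) cps (PySem.Dict.empty, 0)).1 := rfl
  have hcntv : ∀ k, k < vals.length → ∀ q,
      ((figBOcc ids cps).getD k PySem.Dict.empty).getD q 0
        = (cps.getD q []).count (vals.getD k "") := by
    intro k hklt q
    rw [hOcc, hcnt0 k q]
    by_cases hq : q < cps.length
    · rw [if_pos ⟨Nat.zero_le q, by omega⟩, Nat.sub_zero]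
      have hfc : (cps.getD q []).filter (fun v => ids.getD v 0 == k)
          = (cps.getD q []).filter (fun v => v == vals.getD k "") := by
        refine List.filter_congr (fun v hv => ?_)
        have hvv : v ∈ vals := hcovv q v hv
        have hvid : ids.getD v 0 = vals.idxOf v := hidx v hvv
        rw [hvid]
        by_cases hvk : vals.idxOf v = k
        · rw [← hvk, pvIdxOf_getD vals v hvv]
          simp
        · have : v ≠ vals.getD k "" := by
            intro he
            apply hvk
            have h1 : vals.idxOf v < vals.length := List.idxOf_lt_length_iff.mpr hvv
            have h2 : vals.getD (vals.idxOf v) "" = v := pvIdxOf_getD vals v hvv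
            by_contra hne
            exact (pvGetD_ne_of_ne vals hvnd (vals.idxOf v) k h1 hklt hne) (h2.trans he)
          simp only [List.getD_eq_getElem?_getD] at this
          simp [hvk, this]
      rw [hfc, ← List.count_eq_length_filter]
      simp [pysem]
    · rw [if_neg (by omega), pvGetD_big cps q [] (Nat.le_of_not_lt hq)]
      simp [pysem]
  have hlen' : ∀ q, (cps.map List.length).getD q 0 = (cps.getD q []).length :=
    fun q => pvGetD_map_f List.length cps q [] 0 rfl
  have hsid' : ∀ q, (cps.map (fun row => (row.map (fun v => ids.getD v 0)).sum)).getD q 0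
      = ((cps.getD q []).map (fun v => vals.idxOf v)).sum := by
    intro q
    rw [pvGetD_map_f (fun row => (row.map (fun v => ids.getD v 0)).sum) cps q [] 0 rfl]
    exact congrArg List.sum (List.map_congr_left (fun v hv => hidx v (hcovv q v hv)))
  have hnd' : ∀ k, ((figBOcc ids cps).getD k PySem.Dict.empty).keys.Nodup := by
    intro k
    rw [hOcc]
    exact hnd0 k
  have hmem' : ∀ k, k < vals.length → ∀ q,
      (q ∈ ((figBOcc ids cps).getD k PySem.Dict.empty).keys ↔
        0 < (cps.getD q []).count (vals.getD k "")) := by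
    intro k hklt q
    rw [← hcntv k hklt q, hOcc]
    exact hiff0 k q
  have hlive' : ∀ q, q ∈ (List.range cps.length).filter
      (fun q => (cps.map List.length).getD q 0 == 1) ↔ (cps.getD q []).length = 1 := by
    intro q
    rw [List.mem_filter, List.mem_range, hlen' q]
    constructor
    · rintro ⟨_, h2⟩
      simpa using h2
    · intro h1
      refine ⟨?_, by simpa using h1⟩
      by_contra hq
      rw [pvGetD_big cps q [] (Nat.le_of_not_lt hq)] at h1
      simp at h1
  apply pvLoopEq
  · exact hvnd
  · exact ⟨List.length_map _, List.length_map _, hlen', hsid', hcovv, hnd', hcntv, hmem', hlive'⟩
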